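-- pv_equiv track=rewrite | github.com/mins-git/DailyAlgorithmChallenge | swea/Queue/1226_미로/1226.py | bfs
-- ===== SOURCE A (Python) =====
-- from collections import deque
--
-- def bfs(start, end, matrix, N):
--     visited = [[False]*N for _ in range(N)]
--     q = deque()
--     q.append(start)
--     visited[start[0]][start[1]] = True
--
--     while q:
--         now = q.popleft() # 현재 왼쪽에 있는것 디큐
--         if now == end:
--             return 1
--         for dx, dy in [[1,0],[0,1],[-1,0],[0,-1]]:
--             nx = now[0] + dx # now는 현재 x y로 표현됨
--             ny = now[1] + dy #
--             if 0 <= nx < N and 0 <= ny < N and matrix[nx][ny] != 1 and not visited[nx][ny]: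
--                 q.append([nx,ny])
--                 visited[nx][ny] = True
--     return 0
-- ===== SOURCE B (Python) =====
-- def bfs(start, end, matrix, N):
--     # Level-synchronized flood fill: instead of a deque, process the search
--     # frontier one whole generation at a time, building the next generation
--     # as a fresh list; the goal test moves to discovery time.
--     if start == end:
--         return 1
--     visited = [[False] * N for _ in range(N)]
--     visited[start[0]][start[1]] = True
--     frontier = [(start[0], start[1])]
--     while frontier:
--         nxt = []
--         for x, y in frontier:
--             for nx, ny in ((x + 1, y), (x, y + 1), (x - 1, y), (x, y - 1)):
--                 if 0 <= nx < N and 0 <= ny < N and not visited[nx][ny] and matrix[nx][ny] != 1: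
--                     if end == [nx, ny]:
--                         return 1
--                     visited[nx][ny] = True
--                     nxt.append((nx, ny))
--         frontier = nxt
--     return 0
-- ===== Notes on version B (the rewrite author's own statement) =====
-- stated objective: alternative
-- what changed: Replaces the deque-based node-at-a-time breadth-first search (FIFO popleft, goal test when a node is dequeued) by a level-synchronized flood fill: the whole frontier generation is expanded at once into a freshly built next-generation list, neighbours are enumerated directly as coordinate tuples instead of dx/dy offsets, and the goal test moves to discovery time (start==end hoisted out of the loop).
-- outside the precondition, e.g. on bfs([2, -1, 3], [1, -2], [[0], [], [1, 1, 1]], 4): A returns 0, B returns 0; on bfs([-1, 1], [3, 2], [[2, 1, 1], [0, 1, 0], [1, 2, 1]], 4): A returns 0, B returns 0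
import Mathlib
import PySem

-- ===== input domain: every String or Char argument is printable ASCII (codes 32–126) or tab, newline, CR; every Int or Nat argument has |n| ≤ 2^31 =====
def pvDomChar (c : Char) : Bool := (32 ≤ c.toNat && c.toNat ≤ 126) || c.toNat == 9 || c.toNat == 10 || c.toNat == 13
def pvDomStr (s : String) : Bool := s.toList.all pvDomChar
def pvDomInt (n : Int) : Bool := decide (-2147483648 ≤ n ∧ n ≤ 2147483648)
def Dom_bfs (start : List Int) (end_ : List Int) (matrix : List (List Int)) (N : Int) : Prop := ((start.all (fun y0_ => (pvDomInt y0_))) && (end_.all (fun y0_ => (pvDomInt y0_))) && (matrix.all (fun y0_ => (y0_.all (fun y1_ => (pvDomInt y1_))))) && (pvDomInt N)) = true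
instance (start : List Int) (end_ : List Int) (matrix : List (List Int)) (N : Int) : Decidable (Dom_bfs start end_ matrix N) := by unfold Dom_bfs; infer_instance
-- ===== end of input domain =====

-- B replaces A's deque-based node-at-a-time BFS by a level-synchronized flood
-- fill (whole generations expanded at once, goal test at discovery time);
-- the 0/1 reachability answer is identical.

-- ===== PORT A =====
-- the four moves [[1,0],[0,1],[-1,0],[0,-1]]
def pvDirs : List (Int × Int) := [(1, 0), (0, 1), (-1, 0), (0, -1)]

-- matrix[x][y]; exact for the in-range accesses A makes (guard 0 ≤ x < N, 0 ≤ y < N under Pre_)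
def pvMGet (matrix : List (List Int)) (x y : Int) : Int :=
  PySem.List.pyGetD (PySem.List.pyGetD matrix x []) y 0

-- visited[x][y]; exact for the in-range accesses A makes under Pre_
def pvVGet (v : List (List Bool)) (x y : Int) : Bool :=
  PySem.List.pyGetD (PySem.List.pyGetD v x []) y false

-- visited[x][y] = True; exact for every in-range (possibly negative, Python-wrapping)
-- write A makes on an input it returns on
def pvVSet (v : List (List Bool)) (x y : Int) : List (List Bool) :=
  let i := if x < 0 then x + v.length else x
  let row := PySem.List.pyGetD v x []
  let j := if y < 0 then y + row.length else y
  v.set i.toNat (row.set j.toNat true)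

-- body of A's `for dx, dy in …` loop: conditionally enqueue [nx,ny] and mark it visited
def pvStepA (matrix : List (List Int)) (N : Int) (now : List Int)
    (st : List (List Int) × List (List Bool)) (d : Int × Int) :
    List (List Int) × List (List Bool) :=
  let nx := PySem.List.pyGetD now 0 0 + d.1
  let ny := PySem.List.pyGetD now 1 0 + d.2
  if 0 ≤ nx ∧ nx < N ∧ 0 ≤ ny ∧ ny < N ∧ pvMGet matrix nx ny ≠ 1 ∧ pvVGet st.2 nx ny = false
  then (st.1 ++ [[nx, ny]], pvVSet st.2 nx ny)
  else st

-- A's `while q:` loop; the Nat argument is a fuel bound (totality guard only — proven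
-- sufficient under Pre_ in the lemmas below), popleft = head, append = ++ [·]
def pvLoopA (end_ : List Int) (matrix : List (List Int)) (N : Int) :
    Nat → List (List Int) → List (List Bool) → Int
  | 0, _, _ => 0
  | _ + 1, [], _ => 0
  | f + 1, now :: rest, v =>
    if now = end_ then 1
    else
      let st := pvDirs.foldl (pvStepA matrix N now) (rest, v)
      pvLoopA end_ matrix N f st.1 st.2

def bfs (start : List Int) (end_ : List Int) (matrix : List (List Int)) (N : Int) : Int :=
  -- visited = [[False]*N for _ in range(N)]
  let v0 : List (List Bool) := List.replicate N.toNat (List.replicate N.toNat false)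
  -- q = deque([start]); visited[start[0]][start[1]] = True
  let v1 := pvVSet v0 (PySem.List.pyGetD start 0 0) (PySem.List.pyGetD start 1 0)
  pvLoopA end_ matrix N (2 * N * N + 1).toNat [start] v1

-- ===== PORT B =====
-- the four neighbour coordinates ((x+1,y),(x,y+1),(x-1,y),(x,y-1)) of Source B's inner loop
def pvNbrs (x y : Int) : List (Int × Int) :=
  [(x + 1, y), (x, y + 1), (x - 1, y), (x, y - 1)]

-- body of Source B's innermost `for nx, ny in …` loop: the Bool flag is the early
-- `return 1` on discovering `end`; otherwise conditionally mark and append to nxt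
def pvVisit (end_ : List Int) (matrix : List (List Int)) (N : Int)
    (st : Bool × List (Int × Int) × List (List Bool)) (q : Int × Int) :
    Bool × List (Int × Int) × List (List Bool) :=
  if st.1 then st
  else if 0 ≤ q.1 ∧ q.1 < N ∧ 0 ≤ q.2 ∧ q.2 < N ∧ pvVGet st.2.2 q.1 q.2 = false ∧
      pvMGet matrix q.1 q.2 ≠ 1 then
    if end_ = [q.1, q.2] then (true, st.2.1, st.2.2)
    else (false, st.2.1 ++ [q], pvVSet st.2.2 q.1 q.2)
  else st

-- Source B's middle `for x, y in frontier` loop: expand one whole generation,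
-- starting from the freshly created empty `nxt` list
def pvLevel (end_ : List Int) (matrix : List (List Int)) (N : Int)
    (frontier : List (Int × Int)) (v : List (List Bool)) :
    Bool × List (Int × Int) × List (List Bool) :=
  frontier.foldl (fun st p => (pvNbrs p.1 p.2).foldl (pvVisit end_ matrix N) st)
    (false, [], v)

-- Source B's `while frontier:` loop over generations; the Nat argument is a fuel
-- bound (totality guard only — proven sufficient under Pre_)
def pvLoopL (end_ : List Int) (matrix : List (List Int)) (N : Int) :
    Nat → List (Int × Int) → List (List Bool) → Int
  | 0, _, _ => 0
  | _ + 1, [], _ => 0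
  | f + 1, p :: rest, v =>
    let st := pvLevel end_ matrix N (p :: rest) v
    if st.1 then 1 else pvLoopL end_ matrix N f st.2.1 st.2.2

def bfs_alt (start : List Int) (end_ : List Int) (matrix : List (List Int)) (N : Int) : Int :=
  if start = end_ then 1
  else
    -- visited = [[False]*N for _ in range(N)]; visited[start[0]][start[1]] = True
    let v0 : List (List Bool) := List.replicate N.toNat (List.replicate N.toNat false)
    let v1 := pvVSet v0 (PySem.List.pyGetD start 0 0) (PySem.List.pyGetD start 1 0)
    -- frontier = [(start[0], start[1])]
    pvLoopL end_ matrix N (2 * N * N + 1).toNat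
      [(PySem.List.pyGetD start 0 0, PySem.List.pyGetD start 1 0)] v1

-- ===== PRECONDITION & SPEC =====
-- Pre_ is the inputs on which A's run never takes an out-of-range index (no
-- IndexError): N ≥ 1, start has its two coordinates and they are in Python's
-- wrapping index range, and either start equals end (A answers at the first pop,
-- before touching the matrix), or the matrix covers the N×N grid, or the start
-- cell provably has no in-grid neighbor to probe (both coordinates negative, a
-- coordinate ≤ -2, or the single-cell grid N = 1) so the matrix is never read.
-- It excludes only crashing runs and, to stay closed-form, the few returning
-- runs whose ragged matrix merely happens never to be probed.
def Pre_bfs (start : List Int) (end_ : List Int) (matrix : List (List Int)) (N : Int) : Prop :=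
  1 ≤ N ∧ 2 ≤ start.length ∧
  -N ≤ PySem.List.pyGetD start 0 0 ∧ PySem.List.pyGetD start 0 0 < N ∧
  -N ≤ PySem.List.pyGetD start 1 0 ∧ PySem.List.pyGetD start 1 0 < N ∧
  (start = end_ ∨
    (N.toNat ≤ matrix.length ∧ ∀ row ∈ matrix.take N.toNat, N.toNat ≤ row.length) ∨
    (PySem.List.pyGetD start 0 0 < 0 ∧ PySem.List.pyGetD start 1 0 < 0) ∨
    PySem.List.pyGetD start 0 0 ≤ -2 ∨ PySem.List.pyGetD start 1 0 ≤ -2 ∨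
    (N = 1 ∧ PySem.List.pyGetD start 0 0 = 0 ∧ PySem.List.pyGetD start 1 0 = 0))
instance (start : List Int) (end_ : List Int) (matrix : List (List Int)) (N : Int) : Decidable (Pre_bfs start end_ matrix N) := by unfold Pre_bfs; infer_instance

def pvWitness_bfs : List Int × List Int × List (List Int) × Int :=
  ([0, 0], [1, 1], [[0, 0], [1, 0]], 2)

def Spec_bfs (start : List Int) (end_ : List Int) (matrix : List (List Int)) (N : Int) (out : Int) : Prop := out = bfs_alt start end_ matrix N
instance (start : List Int) (end_ : List Int) (matrix : List (List Int)) (N : Int) (out : Int) : Decidable (Spec_bfs start end_ matrix N out) := by unfold Spec_bfs; infer_instance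

-- ===== CLAIM (what is proved, stated in full; the proofs are below) =====
def Claim_equal_bfs : Prop := ∀ (start : List Int) (end_ : List Int) (matrix : List (List Int)) (N : Int), Dom_bfs start end_ matrix N → Pre_bfs start end_ matrix N → Spec_bfs start end_ matrix N (bfs start end_ matrix N)

-- ===== LEMMAS AND PROOFS =====

-- cell p lies in the N×N grid
def InGrid (N : Int) (p : Int × Int) : Prop :=
  0 ≤ p.1 ∧ p.1 < N ∧ 0 ≤ p.2 ∧ p.2 < N

-- cell p is in the grid and not a wall
def GoodC (matrix : List (List Int)) (N : Int) (p : Int × Int) : Prop :=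
  InGrid N p ∧ pvMGet matrix p.1 p.2 ≠ 1

-- q is one of the four neighbors of p
def NbrC (p q : Int × Int) : Prop := ∃ d ∈ pvDirs, q = (p.1 + d.1, p.2 + d.2)

-- Python's wrapping index into a length-N list
def wrapI (N x : Int) : Int := if x < 0 then x + N else x

-- the cells both searches enqueue: reached from the start cell c0 through
-- in-grid non-wall neighbors, never entering the initially marked cell w
inductive ReachW (matrix : List (List Int)) (N : Int) (c0 w : Int × Int) :
    Int × Int → Prop
  | first {q : Int × Int} : GoodC matrix N q → NbrC c0 q → q ≠ w →
      ReachW matrix N c0 w q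
  | step {p q : Int × Int} : ReachW matrix N c0 w p → GoodC matrix N q →
      NbrC p q → q ≠ w → ReachW matrix N c0 w q

-- the common acceptance condition of both programs
def AccC (start end_ : List Int) (matrix : List (List Int)) (N : Int)
    (c0 w : Int × Int) : Prop :=
  end_ = start ∨ ∃ ex ey : Int, end_ = [ex, ey] ∧ ReachW matrix N c0 w (ex, ey)

-- the grid as a finset (for the fuel measure)
noncomputable def gridS (N : Int) : Finset (Int × Int) :=
  Finset.Icc 0 (N - 1) ×ˢ Finset.Icc 0 (N - 1)

theorem mem_gridS (N : Int) (p : Int × Int) : p ∈ gridS N ↔ InGrid N p := by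
  cases p with
  | mk a b =>
    simp [gridS, InGrid, Finset.mem_product, Finset.mem_Icc]
    omega

theorem card_gridS (N : Int) (hN : 1 ≤ N) : (gridS N).card = N.toNat * N.toNat := by
  simp [gridS, Finset.card_product, Int.card_Icc]

theorem ingrid_wrap (N x y : Int) (hN : 1 ≤ N) (hx : -N ≤ x) (hx2 : x < N)
    (hy : -N ≤ y) (hy2 : y < N) : InGrid N (wrapI N x, wrapI N y) := by
  unfold wrapI InGrid
  split_ifs <;> constructor <;> simp <;> omega

-- ---------- the visited matrix ----------

-- the visited matrix is N×N
def shapeV (N : Int) (v : List (List Bool)) : Prop :=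
  v.length = N.toNat ∧ ∀ row ∈ v, row.length = N.toNat

theorem toNat_lt_of_ingrid_fst (N : Int) (p : Int × Int) (hp : InGrid N p) :
    p.1.toNat < N.toNat := by
  rcases hp with ⟨h1, h2, h3, h4⟩
  omega

theorem toNat_lt_of_ingrid_snd (N : Int) (p : Int × Int) (hp : InGrid N p) :
    p.2.toNat < N.toNat := by
  rcases hp with ⟨h1, h2, h3, h4⟩
  omega

theorem row_len (N : Int) (v : List (List Bool)) (h : shapeV N v) (i : Nat)
    (hi : i < v.length) : (v[i]).length = N.toNat :=
  h.2 _ (List.getElem_mem hi)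

theorem vget_eq (N : Int) (v : List (List Bool)) (p : Int × Int)
    (h : shapeV N v) (hp : InGrid N p) :
    pvVGet v p.1 p.2 = (v.getD p.1.toNat []).getD p.2.toNat false := by
  have hx : p.1.toNat < v.length := by rw [h.1]; exact toNat_lt_of_ingrid_fst N p hp
  have hy : p.2.toNat < (v[p.1.toNat]).length := by
    rw [row_len N v h _ hx]; exact toNat_lt_of_ingrid_snd N p hp
  unfold pvVGet
  rw [PySem.List.pyGetD_eq_getElem v [] hp.1
    (by rcases hp with ⟨h1, h2, h3, h4⟩; have hL := h.1; omega)]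
  rw [PySem.List.pyGetD_eq_getElem _ false hp.2.2.1
    (by rcases hp with ⟨h1, h2, h3, h4⟩; have hr := row_len N v h _ hx; omega)]
  rw [List.getD_eq_getElem v [] hx, List.getD_eq_getElem _ false hy]

theorem ingrid_eq_of_toNat (N : Int) (p q : Int × Int) (hp : InGrid N p)
    (hq : InGrid N q) (h1 : p.1.toNat = q.1.toNat) (h2 : p.2.toNat = q.2.toNat) :
    p = q := by
  rcases hp with ⟨a1, a2, a3, a4⟩
  rcases hq with ⟨b1, b2, b3, b4⟩
  have e1 : p.1 = q.1 := by omega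
  have e2 : p.2 = q.2 := by omega
  exact Prod.ext e1 e2

theorem pvVSet_ingrid (N : Int) (v : List (List Bool)) (p : Int × Int)
    (h : shapeV N v) (hp : InGrid N p) :
    pvVSet v p.1 p.2 = v.set p.1.toNat ((v.getD p.1.toNat []).set p.2.toNat true) := by
  have hx : p.1.toNat < v.length := by rw [h.1]; exact toNat_lt_of_ingrid_fst N p hp
  unfold pvVSet
  rw [if_neg (by rcases hp with ⟨h1, h2, h3, h4⟩; omega)]
  rw [PySem.List.pyGetD_eq_getElem v [] hp.1
    (by rcases hp with ⟨h1, h2, h3, h4⟩; have hL := h.1; omega)]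
  dsimp only
  rw [if_neg (by rcases hp with ⟨h1, h2, h3, h4⟩; omega)]
  rw [List.getD_eq_getElem v [] hx]

theorem shapeV_set (N : Int) (v : List (List Bool)) (p : Int × Int)
    (h : shapeV N v) (hp : InGrid N p) : shapeV N (pvVSet v p.1 p.2) := by
  have hx : p.1.toNat < v.length := by rw [h.1]; exact toNat_lt_of_ingrid_fst N p hp
  rw [pvVSet_ingrid N v p h hp]
  constructor
  · rw [List.length_set]; exact h.1
  · intro row hrow
    rcases List.mem_or_eq_of_mem_set hrow with hrow | rfl
    · exact h.2 _ hrow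
    · rw [List.length_set, List.getD_eq_getElem v [] hx]
      exact row_len N v h _ hx

theorem vget_vset (N : Int) (v : List (List Bool)) (p q : Int × Int)
    (h : shapeV N v) (hp : InGrid N p) (hq : InGrid N q) :
    pvVGet (pvVSet v p.1 p.2) q.1 q.2 =
      if q = p then true else pvVGet v q.1 q.2 := by
  have hx : p.1.toNat < v.length := by rw [h.1]; exact toNat_lt_of_ingrid_fst N p hp
  have hrowp : (v.getD p.1.toNat []).length = N.toNat := by
    rw [List.getD_eq_getElem v [] hx]; exact row_len N v h _ hx
  have hqx : q.1.toNat < v.length := by rw [h.1]; exact toNat_lt_of_ingrid_fst N q hq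
  have hqy : q.2.toNat < N.toNat := toNat_lt_of_ingrid_snd N q hq
  rw [vget_eq N _ q (shapeV_set N v p h hp) hq, vget_eq N v q h hq,
    pvVSet_ingrid N v p h hp]
  rw [List.getD_eq_getElem?_getD (l := v.set p.1.toNat _), List.getElem?_set]
  by_cases hrow : p.1.toNat = q.1.toNat
  · rw [if_pos hrow, if_pos hx]
    simp only [Option.getD_some]
    rw [List.getD_eq_getElem?_getD (l := (v.getD p.1.toNat []).set p.2.toNat true),
      List.getElem?_set]
    by_cases hcol : p.2.toNat = q.2.toNat
    · rw [if_pos hcol, if_pos (by rw [hrowp]; rcases hp with ⟨a1, a2, a3, a4⟩; omega)]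
      rw [if_pos (ingrid_eq_of_toNat N q p hq hp (by omega) (by omega))]
      rfl
    · rw [if_neg hcol]
      rw [if_neg (by
        intro hqp
        rw [hqp] at hcol
        exact hcol rfl)]
      rw [List.getD_eq_getElem?_getD (l := v.getD q.1.toNat []), ← hrow]
  · rw [if_neg hrow]
    rw [if_neg (by
      intro hqp
      rw [hqp] at hrow
      exact hrow rfl)]
    rw [List.getD_eq_getElem?_getD (l := v)]

theorem shapeV_replicate (N : Int) :
    shapeV N (List.replicate N.toNat (List.replicate N.toNat false)) := by
  constructor
  · exact List.length_replicate
  · intro row hrow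
    rw [List.eq_of_mem_replicate hrow]
    exact List.length_replicate

theorem vget_replicate (N : Int) (p : Int × Int) (hp : InGrid N p) :
    pvVGet (List.replicate N.toNat (List.replicate N.toNat false)) p.1 p.2 = false := by
  rw [vget_eq N _ p (shapeV_replicate N) hp]
  rw [List.getD_eq_getElem?_getD
      (l := (List.replicate N.toNat (List.replicate N.toNat false)).getD p.1.toNat []),
    List.getD_eq_getElem?_getD (l := List.replicate N.toNat (List.replicate N.toNat false)),
    List.getElem?_replicate, if_pos (toNat_lt_of_ingrid_fst N p hp)]
  simp only [Option.getD_some]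
  rw [List.getElem?_replicate, if_pos (toNat_lt_of_ingrid_snd N p hp)]
  rfl

-- number of unvisited grid cells: the loop measure
noncomputable def unvis (N : Int) (v : List (List Bool)) : Nat :=
  ((gridS N).filter (fun c => pvVGet v c.1 c.2 = false)).card

theorem unvis_le (N : Int) (v : List (List Bool)) : unvis N v ≤ (gridS N).card :=
  Finset.card_filter_le _ _

theorem unvis_set (N : Int) (v : List (List Bool)) (p : Int × Int)
    (h : shapeV N v) (hp : InGrid N p) (hf : pvVGet v p.1 p.2 = false) :
    unvis N (pvVSet v p.1 p.2) + 1 ≤ unvis N v := by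
  have hmem : p ∈ (gridS N).filter (fun c => pvVGet v c.1 c.2 = false) := by
    rw [Finset.mem_filter]
    exact ⟨(mem_gridS N p).mpr hp, hf⟩
  have hsub : (gridS N).filter (fun c => pvVGet (pvVSet v p.1 p.2) c.1 c.2 = false) ⊆
      ((gridS N).filter (fun c => pvVGet v c.1 c.2 = false)).erase p := by
    intro c hc
    rw [Finset.mem_filter] at hc
    have hcg : InGrid N c := (mem_gridS N c).mp hc.1
    rw [Finset.mem_erase, Finset.mem_filter]
    have hcne : c ≠ p := by
      intro rfl_
      rw [rfl_] at hc
      rw [vget_vset N v p p h hp hp, if_pos rfl] at hc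
      exact Bool.true_eq_false.mp hc.2
    refine ⟨hcne, hc.1, ?_⟩
    rw [vget_vset N v p c h hp hcg, if_neg hcne] at hc
    exact hc.2
  have h1 := Finset.card_le_card hsub
  rw [Finset.card_erase_of_mem hmem] at h1
  have h2 : 0 < ((gridS N).filter (fun c => pvVGet v c.1 c.2 = false)).card :=
    Finset.card_pos.mpr ⟨p, hmem⟩
  unfold unvis
  omega

-- marking visited[x][y] with Python-wrapping indices is marking the wrapped cell
theorem pvVSet_wrap (N : Int) (v : List (List Bool)) (x y : Int) (h : shapeV N v)
    (hN : 1 ≤ N) (hx : -N ≤ x) (hx2 : x < N) (hy : -N ≤ y) (hy2 : y < N) :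
    pvVSet v x y = pvVSet v (wrapI N x) (wrapI N y) := by
  have hw : InGrid N (wrapI N x, wrapI N y) := ingrid_wrap N x y hN hx hx2 hy hy2
  have hlen : (v.length : Int) = N := by
    rw [h.1]; omega
  have hxw : (wrapI N x).toNat < v.length := by
    have := toNat_lt_of_ingrid_fst N _ hw
    omega
  have hrow : PySem.List.pyGetD v x [] = v.getD (wrapI N x).toNat [] := by
    rw [List.getD_eq_getElem v [] hxw]
    by_cases hneg : x < 0
    · have hk : x = -(((-x).toNat : Nat) : Int) := by omega
      conv_lhs => rw [hk]
      rw [PySem.List.pyGetD_neg_natCast v (-x).toNat [] (by omega) (by omega)]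
      congr 1
      unfold wrapI
      rw [if_pos hneg]
      omega
    · rw [PySem.List.pyGetD_eq_getElem v [] (by omega) (by omega)]
      congr 1
      unfold wrapI
      rw [if_neg hneg]
  have hrl : (PySem.List.pyGetD v x []).length = N.toNat := by
    rw [hrow, List.getD_eq_getElem v [] hxw]
    exact row_len N v h _ hxw
  rw [pvVSet_ingrid N v (wrapI N x, wrapI N y) h hw]
  dsimp only
  unfold pvVSet
  dsimp only
  have hi : (if x < 0 then x + (v.length : Int) else x).toNat = (wrapI N x).toNat := by
    unfold wrapI
    split_ifs <;> omega
  have hj : (if y < 0 then y + ((PySem.List.pyGetD v x []).length : Int) else y).toNat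
      = (wrapI N y).toNat := by
    rw [hrl]
    unfold wrapI
    split_ifs <;> omega
  rw [hi, hj, hrow]

-- ---------- A side: one neighbor step and the four-direction fold ----------

theorem stepA_pos (matrix : List (List Int)) (N : Int) (now : List Int) (a b : Int)
    (e0 : PySem.List.pyGetD now 0 0 = a) (e1 : PySem.List.pyGetD now 1 0 = b)
    (d : Int × Int) (q0 : List (List Int)) (v : List (List Bool))
    (hg : GoodC matrix N (a + d.1, b + d.2))
    (hm : pvVGet v (a + d.1) (b + d.2) = false) :
    pvStepA matrix N now (q0, v) d =
      (q0 ++ [[a + d.1, b + d.2]], pvVSet v (a + d.1) (b + d.2)) := by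
  unfold pvStepA
  simp only [e0, e1]
  rw [if_pos ⟨hg.1.1, hg.1.2.1, hg.1.2.2.1, hg.1.2.2.2, hg.2, hm⟩]

theorem stepA_neg (matrix : List (List Int)) (N : Int) (now : List Int) (a b : Int)
    (e0 : PySem.List.pyGetD now 0 0 = a) (e1 : PySem.List.pyGetD now 1 0 = b)
    (d : Int × Int) (q0 : List (List Int)) (v : List (List Bool))
    (hng : ¬(GoodC matrix N (a + d.1, b + d.2) ∧ pvVGet v (a + d.1) (b + d.2) = false)) :
    pvStepA matrix N now (q0, v) d = (q0, v) := by
  unfold pvStepA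
  simp only [e0, e1]
  rw [if_neg (by
    rintro ⟨h1, h2, h3, h4, h5, h6⟩
    exact hng ⟨⟨⟨h1, h2, h3, h4⟩, h5⟩, h6⟩)]

theorem foldA_char (matrix : List (List Int)) (N : Int) (now : List Int) (a b : Int)
    (e0 : PySem.List.pyGetD now 0 0 = a) (e1 : PySem.List.pyGetD now 1 0 = b) :
    ∀ (ds : List (Int × Int)) (q0 : List (List Int)) (v : List (List Bool)),
      shapeV N v →
      shapeV N (ds.foldl (pvStepA matrix N now) (q0, v)).2 ∧
      (∀ p : Int × Int, InGrid N p →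
        (pvVGet (ds.foldl (pvStepA matrix N now) (q0, v)).2 p.1 p.2 = true ↔
          pvVGet v p.1 p.2 = true ∨
            (GoodC matrix N p ∧ ∃ d ∈ ds, p = (a + d.1, b + d.2)))) ∧
      (∀ e ∈ q0, e ∈ (ds.foldl (pvStepA matrix N now) (q0, v)).1) ∧
      (∀ e ∈ (ds.foldl (pvStepA matrix N now) (q0, v)).1,
        e ∈ q0 ∨ ∃ p : Int × Int, e = [p.1, p.2] ∧ GoodC matrix N p ∧
          (∃ d ∈ ds, p = (a + d.1, b + d.2)) ∧ pvVGet v p.1 p.2 = false) ∧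
      (∀ p : Int × Int, InGrid N p →
        pvVGet (ds.foldl (pvStepA matrix N now) (q0, v)).2 p.1 p.2 = true →
        pvVGet v p.1 p.2 = false →
        [p.1, p.2] ∈ (ds.foldl (pvStepA matrix N now) (q0, v)).1) ∧
      (ds.foldl (pvStepA matrix N now) (q0, v)).1.length +
          2 * unvis N (ds.foldl (pvStepA matrix N now) (q0, v)).2 ≤
        q0.length + 2 * unvis N v := by
  intro ds
  induction ds with
  | nil =>
    intro q0 v hs
    simp only [List.foldl_nil]
    refine ⟨hs, ?_, ?_, ?_, ?_, le_refl _⟩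
    · intro p _
      simp
    · intro e he
      exact he
    · intro e he
      exact Or.inl he
    · intro p _ h1 h2
      rw [h1] at h2
      exact absurd h2 (by simp)
  | cons d ds ih =>
    intro q0 v hs
    simp only [List.foldl_cons]
    by_cases hc : GoodC matrix N (a + d.1, b + d.2) ∧ pvVGet v (a + d.1) (b + d.2) = false
    · rw [stepA_pos matrix N now a b e0 e1 d q0 v hc.1 hc.2]
      have hg : InGrid N (a + d.1, b + d.2) := hc.1.1
      obtain ⟨ihs, ihm, ihq, ihq', ihp, ihmeas⟩ :=
        ih (q0 ++ [[a + d.1, b + d.2]]) (pvVSet v (a + d.1) (b + d.2))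
          (shapeV_set N v (a + d.1, b + d.2) hs hg)
      have hvv : ∀ p : Int × Int, InGrid N p →
          pvVGet (pvVSet v (a + d.1) (b + d.2)) p.1 p.2 =
            if p = (a + d.1, b + d.2) then true else pvVGet v p.1 p.2 := by
        intro p hp
        exact vget_vset N v (a + d.1, b + d.2) p hs hg hp
      refine ⟨ihs, ?_, ?_, ?_, ?_, ?_⟩
      · intro p hp
        rw [ihm p hp, hvv p hp]
        by_cases hpt : p = (a + d.1, b + d.2)
        · rw [if_pos hpt]
          subst hpt
          simp only [true_or, true_iff]
          exact Or.inr ⟨hc.1, d, List.mem_cons_self .., rfl⟩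
        · rw [if_neg hpt]
          constructor
          · rintro (h | ⟨hgp, d', hd', rfl⟩)
            · exact Or.inl h
            · exact Or.inr ⟨hgp, d', List.mem_cons_of_mem _ hd', rfl⟩
          · rintro (h | ⟨hgp, d', hd', rfl⟩)
            · exact Or.inl h
            · rcases List.mem_cons.mp hd' with rfl | hd'
              · exact absurd rfl hpt
              · exact Or.inr ⟨hgp, d', hd', rfl⟩
      · intro e he
        exact ihq e (List.mem_append_left _ he)
      · intro e he
        rcases ihq' e he with he' | ⟨p, rfl, hgp, ⟨d', hd', rfl⟩, hnew⟩
        · rcases List.mem_append.mp he' with he'' | he''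
          · exact Or.inl he''
          · rcases List.mem_singleton.mp he'' with rfl
            exact Or.inr ⟨(a + d.1, b + d.2), rfl, hc.1,
              ⟨d, List.mem_cons_self .., rfl⟩, hc.2⟩
        · have hgi : InGrid N (a + d'.1, b + d'.2) := hgp.1
          by_cases hpt : ((a + d'.1, b + d'.2) : Int × Int) = (a + d.1, b + d.2)
          · rw [hpt] at hnew ⊢
            exact Or.inr ⟨(a + d.1, b + d.2), rfl, hc.1,
              ⟨d, List.mem_cons_self .., rfl⟩, hc.2⟩
          · have := hvv (a + d'.1, b + d'.2) hgi
            rw [if_neg hpt] at this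
            rw [this] at hnew
            exact Or.inr ⟨(a + d'.1, b + d'.2), rfl, hgp,
              ⟨d', List.mem_cons_of_mem _ hd', rfl⟩, hnew⟩
      · intro p hp hmt hmf
        by_cases hpt : p = (a + d.1, b + d.2)
        · subst hpt
          exact ihq _ (List.mem_append_right _ (List.mem_singleton.mpr rfl))
        · refine ihp p hp hmt ?_
          rw [hvv p hp, if_neg hpt]
          exact hmf
      · have hset := unvis_set N v (a + d.1, b + d.2) hs hg hc.2
        dsimp only at hset
        rw [List.length_append, List.length_singleton] at ihmeas
        omega
    · rw [stepA_neg matrix N now a b e0 e1 d q0 v hc]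
      obtain ⟨ihs, ihm, ihq, ihq', ihp, ihmeas⟩ := ih q0 v hs
      refine ⟨ihs, ?_, ihq, ?_, ihp, ihmeas⟩
      · intro p hp
        rw [ihm p hp]
        constructor
        · rintro (h | ⟨hgp, d', hd', rfl⟩)
          · exact Or.inl h
          · exact Or.inr ⟨hgp, d', List.mem_cons_of_mem _ hd', rfl⟩
        · rintro (h | ⟨hgp, d', hd', rfl⟩)
          · exact Or.inl h
          · rcases List.mem_cons.mp hd' with rfl | hd'
            · left
              rcases Bool.eq_false_or_eq_true (pvVGet v (a + d'.1) (b + d'.2)) with h | h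
              · exact h
              · exact absurd ⟨hgp, h⟩ hc
            · exact Or.inr ⟨hgp, d', hd', rfl⟩
      · intro e he
        rcases ihq' e he with he' | ⟨p, rfl, hgp, ⟨d', hd', rfl⟩, hnew⟩
        · exact Or.inl he'
        · exact Or.inr ⟨_, rfl, hgp, ⟨d', List.mem_cons_of_mem _ hd', rfl⟩, hnew⟩

-- ---------- A side: the loop invariant ----------

def InvW (start end_ : List Int) (matrix : List (List Int)) (N : Int)
    (c0 w : Int × Int) (q : List (List Int)) (v : List (List Bool)) : Prop :=
  shapeV N v ∧ InGrid N w ∧ pvVGet v w.1 w.2 = true ∧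
  (∀ e ∈ q, e = start ∨ ∃ p : Int × Int, e = [p.1, p.2] ∧
    ReachW matrix N c0 w p ∧ InGrid N p) ∧
  (∀ p : Int × Int, InGrid N p → pvVGet v p.1 p.2 = true →
    p = w ∨ ReachW matrix N c0 w p) ∧
  (start ∈ q ∨ ∀ q' : Int × Int, GoodC matrix N q' → NbrC c0 q' →
    pvVGet v q'.1 q'.2 = true) ∧
  (start ∈ q ∨ start ≠ end_) ∧
  (∀ p : Int × Int, InGrid N p → pvVGet v p.1 p.2 = true →
    p = w ∨ [p.1, p.2] ∈ q ∨ ([p.1, p.2] ≠ end_ ∧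
      ∀ q' : Int × Int, GoodC matrix N q' → NbrC p q' → pvVGet v q'.1 q'.2 = true))

theorem reachW_ingrid (matrix : List (List Int)) (N : Int) (c0 w p : Int × Int)
    (h : ReachW matrix N c0 w p) : InGrid N p := by
  cases h with
  | first hg _ _ => exact hg.1
  | step _ hg _ _ => exact hg.1

theorem reachW_ne (matrix : List (List Int)) (N : Int) (c0 w p : Int × Int)
    (h : ReachW matrix N c0 w p) : p ≠ w := by
  cases h with
  | first _ _ hne => exact hne
  | step _ _ _ hne => exact hne

theorem invW_empty (start end_ : List Int) (matrix : List (List Int)) (N : Int)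
    (c0 w : Int × Int) (v : List (List Bool))
    (hInv : InvW start end_ matrix N c0 w [] v) :
    ¬ AccC start end_ matrix N c0 w := by
  obtain ⟨hsh, hwg, hwm, _, hsound, hcf, hsf, hfront⟩ := hInv
  have hcf' : ∀ q' : Int × Int, GoodC matrix N q' → NbrC c0 q' →
      pvVGet v q'.1 q'.2 = true := by
    rcases hcf with h | h
    · exact absurd h List.not_mem_nil
    · exact h
  have hmark : ∀ p : Int × Int, ReachW matrix N c0 w p →
      pvVGet v p.1 p.2 = true := by
    intro p hp
    induction hp with
    | first hg hn hne => exact hcf' _ hg hn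
    | step hr hg hn hne ih =>
      rcases hfront _ (reachW_ingrid matrix N c0 w _ hr) ih with h | h | h
      · exact absurd h (reachW_ne matrix N c0 w _ hr)
      · exact absurd h List.not_mem_nil
      · exact h.2 _ hg hn
  rintro (heq | ⟨ex, ey, rfl, hre⟩)
  · rcases hsf with h | h
    · exact List.not_mem_nil h
    · exact h heq.symm
  · have hm := hmark (ex, ey) hre
    rcases hfront _ (reachW_ingrid matrix N c0 w _ hre) hm with h | h | h
    · exact reachW_ne matrix N c0 w _ hre h
    · exact List.not_mem_nil h
    · exact h.1 rfl

theorem loopA_charW (start end_ : List Int) (matrix : List (List Int)) (N : Int)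
    (c0 w : Int × Int)
    (hs0 : PySem.List.pyGetD start 0 0 = c0.1)
    (hs1 : PySem.List.pyGetD start 1 0 = c0.2)
    (hwc0 : 0 ≤ c0.1 → 0 ≤ c0.2 → w = c0) :
    ∀ (f : Nat) (q : List (List Int)) (v : List (List Bool)),
      InvW start end_ matrix N c0 w q v → q.length + 2 * unvis N v ≤ f →
      (pvLoopA end_ matrix N f q v = 1 ↔ AccC start end_ matrix N c0 w) := by
  intro f
  induction f with
  | zero =>
    intro q v hInv hm
    have hq : q = [] := List.length_eq_zero_iff.mp (by omega)
    subst hq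
    constructor
    · intro h
      exact absurd h (by simp [pvLoopA])
    · intro hex
      exact absurd hex (invW_empty start end_ matrix N c0 w v hInv)
  | succ f ih =>
    intro q v hInv hm
    cases q with
    | nil =>
      constructor
      · intro h
        exact absurd h (by simp [pvLoopA])
      · intro hex
        exact absurd hex (invW_empty start end_ matrix N c0 w v hInv)
    | cons now rest =>
      obtain ⟨hsh, hwg, hwm, hqc, hsound, hcf, hsf, hfront⟩ := hInv
      have hqcnow := hqc now (List.mem_cons_self ..)
      by_cases hend : now = end_
      · have h1 : pvLoopA end_ matrix N (f + 1) (now :: rest) v = 1 := by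
          rw [pvLoopA, if_pos hend]
        rw [h1]
        simp only [true_iff]
        rcases hqcnow with rfl | ⟨p, rfl, hre, _⟩
        · exact Or.inl hend.symm
        · exact Or.inr ⟨p.1, p.2, hend.symm, hre⟩
      · -- pop now, expand from the cell c (c0 if now is start, else now's cell)
        obtain ⟨c, e0, e1, hckind⟩ :
            ∃ c : Int × Int, PySem.List.pyGetD now 0 0 = c.1 ∧
              PySem.List.pyGetD now 1 0 = c.2 ∧
              ((now = start ∧ c = c0) ∨ ReachW matrix N c0 w c) := by
          rcases hqcnow with rfl | ⟨p, rfl, hre, _⟩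
          · exact ⟨c0, hs0, hs1, Or.inl ⟨rfl, rfl⟩⟩
          · exact ⟨p, rfl, rfl, Or.inr hre⟩
        have hstep : pvLoopA end_ matrix N (f + 1) (now :: rest) v =
            pvLoopA end_ matrix N f
              (pvDirs.foldl (pvStepA matrix N now) (rest, v)).1
              (pvDirs.foldl (pvStepA matrix N now) (rest, v)).2 := by
          rw [pvLoopA, if_neg hend]
        rw [hstep]
        obtain ⟨fsh, fm, fq, fq', fp, fmeas⟩ :=
          foldA_char matrix N now c.1 c.2 e0 e1 pvDirs rest v hsh
        have hreach_new : ∀ p : Int × Int, GoodC matrix N p → NbrC c p →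
            pvVGet v p.1 p.2 = false → ReachW matrix N c0 w p := by
          intro p hgp hnp hnew
          have hpw : p ≠ w := by
            intro hpw
            rw [hpw] at hnew
            rw [hwm] at hnew
            exact absurd hnew (by decide)
          rcases hckind with ⟨-, rfl⟩ | hrc
          · exact ReachW.first hgp hnp hpw
          · exact ReachW.step hrc hgp hnp hpw
        refine ih _ _ ⟨fsh, hwg, (fm w hwg).mpr (Or.inl hwm), ?_, ?_, ?_, ?_, ?_⟩ ?_
        · -- queue cells
          intro e he
          rcases fq' e he with he' | ⟨p, rfl, hgp, ⟨d, hd, rfl⟩, hnew⟩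
          · exact hqc e (List.mem_cons_of_mem _ he')
          · exact Or.inr ⟨_, rfl, hreach_new _ hgp ⟨d, hd, rfl⟩ hnew, hgp.1⟩
        · -- soundness of marks
          intro p hig hmk
          rcases (fm p hig).mp hmk with h | ⟨hgp, d, hd, rfl⟩
          · exact hsound p hig h
          · rcases Bool.eq_false_or_eq_true (pvVGet v ((c.1 + d.1, c.2 + d.2) : Int × Int).1
              ((c.1 + d.1, c.2 + d.2) : Int × Int).2) with hv | hv
            · exact hsound _ hig hv
            · exact Or.inr (hreach_new _ hgp ⟨d, hd, rfl⟩ hv)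
        · -- c0's neighbors
          rcases hcf with hin | hall
          · rcases List.mem_cons.mp hin with heqs | hin'
            · -- start = now: this pop expands c0
              right
              intro q' hgq' hnq'
              have hc0 : c = c0 := by
                rcases hckind with ⟨-, h⟩ | hrc
                · exact h
                · rw [heqs] at hs0 hs1
                  rw [e0] at hs0
                  rw [e1] at hs1
                  exact Prod.ext hs0 hs1
              subst hc0
              obtain ⟨d, hd, rfl⟩ := hnq'
              exact (fm _ hgq'.1).mpr (Or.inr ⟨hgq', d, hd, rfl⟩)
            · exact Or.inl (fq _ hin')
          · right
            intro q' hgq' hnq'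
            exact (fm q' hgq'.1).mpr (Or.inl (hall q' hgq' hnq'))
        · -- start popped means start ≠ end_
          rcases hsf with hin | hne
          · rcases List.mem_cons.mp hin with heqs | hin'
            · refine Or.inr ?_
              rw [heqs]
              exact hend
            · exact Or.inl (fq _ hin')
          · exact Or.inr hne
        · -- frontier
          intro p hig hmk
          rcases Bool.eq_false_or_eq_true (pvVGet v p.1 p.2) with hv | hv
          · rcases hfront p hig hv with h | h | h
            · exact Or.inl h
            · rcases List.mem_cons.mp h with heqn | hin'
              · -- [p] is the popped now
                right; right
                constructor
                · rw [heqn]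
                  exact hend
                · intro q' hgq' hnq'
                  have hpc : p = c := by
                    have h1 : now = [p.1, p.2] := heqn.symm
                    rw [h1] at e0 e1
                    have e0' : PySem.List.pyGetD [p.1, p.2] (0 : Int) (0 : Int) = p.1 := rfl
                    have e1' : PySem.List.pyGetD [p.1, p.2] (1 : Int) (0 : Int) = p.2 := rfl
                    rw [e0'] at e0
                    rw [e1'] at e1
                    exact Prod.ext e0 e1
                  subst hpc
                  obtain ⟨d, hd, rfl⟩ := hnq'
                  exact (fm _ hgq'.1).mpr (Or.inr ⟨hgq', d, hd, rfl⟩)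
              · exact Or.inr (Or.inl (fq _ hin'))
            · refine Or.inr (Or.inr ⟨h.1, ?_⟩)
              intro q' hgq' hnq'
              exact (fm q' hgq'.1).mpr (Or.inl (h.2 q' hgq' hnq'))
          · exact Or.inr (Or.inl (fp p hig hmk hv))
        · -- measure
          rw [List.length_cons] at hm
          omega

theorem loopA_zero_or_one (end_ : List Int) (matrix : List (List Int)) (N : Int) :
    ∀ (f : Nat) (q : List (List Int)) (v : List (List Bool)),
      pvLoopA end_ matrix N f q v = 0 ∨ pvLoopA end_ matrix N f q v = 1 := by
  intro f
  induction f with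
  | zero => intro q v; exact Or.inl rfl
  | succ f ih =>
    intro q v
    cases q with
    | nil => exact Or.inl rfl
    | cons now rest =>
      rw [pvLoopA]
      split_ifs
      · exact Or.inr rfl
      · exact ih _ _

-- ---------- B side: the candidate fold of one generation ----------

theorem visit_stuck (end_ : List Int) (matrix : List (List Int)) (N : Int)
    (st : Bool × List (Int × Int) × List (List Bool)) (q : Int × Int)
    (h : st.1 = true) : pvVisit end_ matrix N st q = st := by
  unfold pvVisit
  rw [if_pos h]

theorem foldVisit_stuck (end_ : List Int) (matrix : List (List Int)) (N : Int) :
    ∀ (qs : List (Int × Int)) (st : Bool × List (Int × Int) × List (List Bool)),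
      st.1 = true → qs.foldl (pvVisit end_ matrix N) st = st := by
  intro qs
  induction qs with
  | nil => intro st _; rfl
  | cons q qs ih =>
    intro st h
    simp only [List.foldl_cons]
    rw [visit_stuck end_ matrix N st q h]
    exact ih st h

theorem visit_hit (end_ : List Int) (matrix : List (List Int)) (N : Int)
    (q : Int × Int) (acc : List (Int × Int)) (v : List (List Bool))
    (hg : GoodC matrix N q) (hm : pvVGet v q.1 q.2 = false)
    (he : end_ = [q.1, q.2]) :
    pvVisit end_ matrix N (false, acc, v) q = (true, acc, v) := by
  unfold pvVisit
  rw [if_neg (by simp)]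
  rw [if_pos ⟨hg.1.1, hg.1.2.1, hg.1.2.2.1, hg.1.2.2.2, hm, hg.2⟩]
  rw [if_pos he]

theorem visit_push (end_ : List Int) (matrix : List (List Int)) (N : Int)
    (q : Int × Int) (acc : List (Int × Int)) (v : List (List Bool))
    (hg : GoodC matrix N q) (hm : pvVGet v q.1 q.2 = false)
    (he : end_ ≠ [q.1, q.2]) :
    pvVisit end_ matrix N (false, acc, v) q = (false, acc ++ [q], pvVSet v q.1 q.2) := by
  unfold pvVisit
  rw [if_neg (by simp)]
  rw [if_pos ⟨hg.1.1, hg.1.2.1, hg.1.2.2.1, hg.1.2.2.2, hm, hg.2⟩]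
  rw [if_neg he]

theorem visit_skip (end_ : List Int) (matrix : List (List Int)) (N : Int)
    (q : Int × Int) (acc : List (Int × Int)) (v : List (List Bool))
    (hng : ¬(GoodC matrix N q ∧ pvVGet v q.1 q.2 = false)) :
    pvVisit end_ matrix N (false, acc, v) q = (false, acc, v) := by
  unfold pvVisit
  rw [if_neg (by simp)]
  rw [if_neg (by
    rintro ⟨h1, h2, h3, h4, h5, h6⟩
    exact hng ⟨⟨⟨h1, h2, h3, h4⟩, h6⟩, h5⟩)]

theorem foldVisit_char (end_ : List Int) (matrix : List (List Int)) (N : Int) :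
    ∀ (qs : List (Int × Int)) (acc : List (Int × Int)) (v : List (List Bool)),
      shapeV N v →
      ((qs.foldl (pvVisit end_ matrix N) (false, acc, v)).1 = true ↔
        ∃ q ∈ qs, GoodC matrix N q ∧ pvVGet v q.1 q.2 = false ∧ end_ = [q.1, q.2]) ∧
      ((qs.foldl (pvVisit end_ matrix N) (false, acc, v)).1 = false →
        shapeV N (qs.foldl (pvVisit end_ matrix N) (false, acc, v)).2.2 ∧
        (∀ p : Int × Int, InGrid N p →
          (pvVGet (qs.foldl (pvVisit end_ matrix N) (false, acc, v)).2.2 p.1 p.2 = true ↔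
            pvVGet v p.1 p.2 = true ∨ (GoodC matrix N p ∧ p ∈ qs))) ∧
        (∀ e ∈ acc, e ∈ (qs.foldl (pvVisit end_ matrix N) (false, acc, v)).2.1) ∧
        (∀ e ∈ (qs.foldl (pvVisit end_ matrix N) (false, acc, v)).2.1,
          e ∈ acc ∨ (GoodC matrix N e ∧ e ∈ qs ∧ pvVGet v e.1 e.2 = false ∧
            end_ ≠ [e.1, e.2])) ∧
        (∀ p : Int × Int, InGrid N p →
          pvVGet (qs.foldl (pvVisit end_ matrix N) (false, acc, v)).2.2 p.1 p.2 = true →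
          pvVGet v p.1 p.2 = false →
          p ∈ (qs.foldl (pvVisit end_ matrix N) (false, acc, v)).2.1) ∧
        (qs.foldl (pvVisit end_ matrix N) (false, acc, v)).2.1.length +
            unvis N (qs.foldl (pvVisit end_ matrix N) (false, acc, v)).2.2 ≤
          acc.length + unvis N v) := by
  intro qs
  induction qs with
  | nil =>
    intro acc v hs
    simp only [List.foldl_nil]
    constructor
    · simp
    · intro _
      refine ⟨hs, ?_, ?_, ?_, ?_, le_refl _⟩
      · intro p _
        simp
      · intro e he
        exact he
      · intro e he
        exact Or.inl he
      · intro p _ h1 h2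
        rw [h1] at h2
        exact absurd h2 (by simp)
  | cons q qs ih =>
    intro acc v hs
    simp only [List.foldl_cons]
    by_cases hc : GoodC matrix N q ∧ pvVGet v q.1 q.2 = false
    · by_cases hce : end_ = [q.1, q.2]
      · -- hit: the flag is raised and everything afterwards is inert
        rw [visit_hit end_ matrix N q acc v hc.1 hc.2 hce,
          foldVisit_stuck end_ matrix N qs (true, acc, v) rfl]
        constructor
        · simp only [true_iff]
          exact ⟨q, List.mem_cons_self .., hc.1, hc.2, hce⟩
        · intro h
          exact absurd h (by simp)
      · -- push and mark q
        rw [visit_push end_ matrix N q acc v hc.1 hc.2 hce]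
        have hg : InGrid N q := hc.1.1
        obtain ⟨ihiff, ihok⟩ :=
          ih (acc ++ [q]) (pvVSet v q.1 q.2) (shapeV_set N v q hs hg)
        have hvv : ∀ p : Int × Int, InGrid N p →
            pvVGet (pvVSet v q.1 q.2) p.1 p.2 =
              if p = q then true else pvVGet v p.1 p.2 := by
          intro p hp
          exact vget_vset N v q p hs hg hp
        constructor
        · rw [ihiff]
          constructor
          · rintro ⟨q', hq', hgq', hun, heq⟩
            have hqne : q' ≠ q := by
              intro rfl_
              rw [rfl_, hvv q hg, if_pos rfl] at hun
              exact absurd hun (by decide)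
            rw [hvv q' hgq'.1, if_neg hqne] at hun
            exact ⟨q', List.mem_cons_of_mem _ hq', hgq', hun, heq⟩
          · rintro ⟨q', hq', hgq', hun, heq⟩
            rcases List.mem_cons.mp hq' with rfl | hq''
            · exact absurd heq hce
            · have hqne : q' ≠ q := by
                intro rfl_
                rw [rfl_] at heq
                exact hce heq
              refine ⟨q', hq'', hgq', ?_, heq⟩
              rw [hvv q' hgq'.1, if_neg hqne]
              exact hun
        · intro hflag
          obtain ⟨fsh, fm, facc, fmem, fpush, fmeas⟩ := ihok hflag
          refine ⟨fsh, ?_, ?_, ?_, ?_, ?_⟩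
          · intro p hp
            rw [fm p hp, hvv p hp]
            by_cases hpt : p = q
            · rw [if_pos hpt]
              subst hpt
              simp only [true_or, true_iff]
              exact Or.inr ⟨hc.1, List.mem_cons_self ..⟩
            · rw [if_neg hpt]
              constructor
              · rintro (h | ⟨hgp, hmem'⟩)
                · exact Or.inl h
                · exact Or.inr ⟨hgp, List.mem_cons_of_mem _ hmem'⟩
              · rintro (h | ⟨hgp, hmem'⟩)
                · exact Or.inl h
                · rcases List.mem_cons.mp hmem' with rfl | hmem''
                  · exact absurd rfl hpt
                  · exact Or.inr ⟨hgp, hmem''⟩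
          · intro e he
            exact facc e (List.mem_append_left _ he)
          · intro e he
            rcases fmem e he with he' | ⟨hge, hemem, hnew, hnee⟩
            · rcases List.mem_append.mp he' with he'' | he''
              · exact Or.inl he''
              · rcases List.mem_singleton.mp he'' with rfl
                exact Or.inr ⟨hc.1, List.mem_cons_self .., hc.2, hce⟩
            · have hene : e ≠ q := by
                intro rfl_
                rw [rfl_, hvv q hg, if_pos rfl] at hnew
                exact absurd hnew (by decide)
              rw [hvv e hge.1, if_neg hene] at hnew
              exact Or.inr ⟨hge, List.mem_cons_of_mem _ hemem, hnew, hnee⟩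
          · intro p hp hmt hmf
            by_cases hpt : p = q
            · subst hpt
              exact facc _ (List.mem_append_right _ (List.mem_singleton.mpr rfl))
            · refine fpush p hp hmt ?_
              rw [hvv p hp, if_neg hpt]
              exact hmf
          · have hset := unvis_set N v q hs hg hc.2
            rw [List.length_append, List.length_singleton] at fmeas
            omega
    · -- guard fails: nothing happens for this candidate
      rw [visit_skip end_ matrix N q acc v hc]
      obtain ⟨ihiff, ihok⟩ := ih acc v hs
      constructor
      · rw [ihiff]
        constructor
        · rintro ⟨q', hq', hgq', hun, heq⟩
          exact ⟨q', List.mem_cons_of_mem _ hq', hgq', hun, heq⟩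
        · rintro ⟨q', hq', hgq', hun, heq⟩
          rcases List.mem_cons.mp hq' with rfl | hq''
          · exact absurd ⟨hgq', hun⟩ hc
          · exact ⟨q', hq'', hgq', hun, heq⟩
      · intro hflag
        obtain ⟨fsh, fm, facc, fmem, fpush, fmeas⟩ := ihok hflag
        refine ⟨fsh, ?_, facc, ?_, fpush, fmeas⟩
        · intro p hp
          rw [fm p hp]
          constructor
          · rintro (h | ⟨hgp, hmem'⟩)
            · exact Or.inl h
            · exact Or.inr ⟨hgp, List.mem_cons_of_mem _ hmem'⟩
          · rintro (h | ⟨hgp, hmem'⟩)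
            · exact Or.inl h
            · rcases List.mem_cons.mp hmem' with rfl | hmem''
              · left
                rcases Bool.eq_false_or_eq_true (pvVGet v p.1 p.2) with hv | hv
                · exact hv
                · exact absurd ⟨hgp, hv⟩ hc
              · exact Or.inr ⟨hgp, hmem''⟩
        · intro e he
          rcases fmem e he with he' | ⟨hge, hemem, hnew, hnee⟩
          · exact Or.inl he'
          · exact Or.inr ⟨hge, List.mem_cons_of_mem _ hemem, hnew, hnee⟩

-- folding the nested per-cell folds equals folding over the flattened candidate list
theorem foldl_nested_flatMap {α β σ : Type} (g : σ → β → σ) (f : α → List β) :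
    ∀ (l : List α) (s : σ),
      l.foldl (fun st p => (f p).foldl g st) s = (l.flatMap f).foldl g s := by
  intro l
  induction l with
  | nil => intro s; rfl
  | cons a l ih =>
    intro s
    simp only [List.foldl_cons, List.flatMap_cons, List.foldl_append]
    exact ih _

theorem mem_pvNbrs (p q : Int × Int) : q ∈ pvNbrs p.1 p.2 ↔ NbrC p q := by
  constructor
  · intro h
    unfold pvNbrs at h
    rcases List.mem_cons.mp h with rfl | h
    · exact ⟨(1, 0), by simp [pvDirs], by simp⟩
    rcases List.mem_cons.mp h with rfl | h
    · exact ⟨(0, 1), by simp [pvDirs], by simp⟩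
    rcases List.mem_cons.mp h with rfl | h
    · exact ⟨(-1, 0), by simp [pvDirs], by simp [sub_eq_add_neg]⟩
    rcases List.mem_cons.mp h with rfl | h
    · exact ⟨(0, -1), by simp [pvDirs], by simp [sub_eq_add_neg]⟩
    · exact absurd h List.not_mem_nil
  · rintro ⟨d, hd, rfl⟩
    unfold pvDirs at hd
    fin_cases hd <;> simp [pvNbrs, sub_eq_add_neg]

theorem mem_candidates (frontier : List (Int × Int)) (q : Int × Int) :
    q ∈ frontier.flatMap (fun p => pvNbrs p.1 p.2) ↔
      ∃ p ∈ frontier, NbrC p q := by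
  rw [List.mem_flatMap]
  constructor
  · rintro ⟨p, hp, hq⟩
    exact ⟨p, hp, (mem_pvNbrs p q).mp hq⟩
  · rintro ⟨p, hp, hq⟩
    exact ⟨p, hp, (mem_pvNbrs p q).mpr hq⟩

-- ---------- B side: the generation-loop invariant ----------

def InvL (end_ : List Int) (matrix : List (List Int)) (N : Int)
    (c0 w : Int × Int) (frontier : List (Int × Int)) (v : List (List Bool)) : Prop :=
  shapeV N v ∧ InGrid N w ∧ pvVGet v w.1 w.2 = true ∧
  (∀ p ∈ frontier, p = c0 ∨ ReachW matrix N c0 w p) ∧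
  (∀ p : Int × Int, InGrid N p → pvVGet v p.1 p.2 = true →
    p = w ∨ (ReachW matrix N c0 w p ∧ end_ ≠ [p.1, p.2])) ∧
  (c0 ∈ frontier ∨ ∀ q' : Int × Int, GoodC matrix N q' → NbrC c0 q' →
    pvVGet v q'.1 q'.2 = true) ∧
  (∀ p : Int × Int, InGrid N p → pvVGet v p.1 p.2 = true →
    p = w ∨ p ∈ frontier ∨ ∀ q' : Int × Int, GoodC matrix N q' → NbrC p q' →
      pvVGet v q'.1 q'.2 = true)

theorem invL_empty (end_ : List Int) (matrix : List (List Int)) (N : Int)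
    (c0 w : Int × Int) (v : List (List Bool))
    (hInv : InvL end_ matrix N c0 w [] v) :
    ¬ ∃ ex ey : Int, end_ = [ex, ey] ∧ ReachW matrix N c0 w (ex, ey) := by
  obtain ⟨hsh, hwg, hwm, _, hsound, hcf, hfront⟩ := hInv
  have hcf' : ∀ q' : Int × Int, GoodC matrix N q' → NbrC c0 q' →
      pvVGet v q'.1 q'.2 = true := by
    rcases hcf with h | h
    · exact absurd h List.not_mem_nil
    · exact h
  have hmark : ∀ p : Int × Int, ReachW matrix N c0 w p →
      pvVGet v p.1 p.2 = true := by
    intro p hp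
    induction hp with
    | first hg hn hne => exact hcf' _ hg hn
    | step hr hg hn hne ih =>
      rcases hfront _ (reachW_ingrid matrix N c0 w _ hr) ih with h | h | h
      · exact absurd h (reachW_ne matrix N c0 w _ hr)
      · exact absurd h List.not_mem_nil
      · exact h _ hg hn
  rintro ⟨ex, ey, rfl, hre⟩
  have hm := hmark (ex, ey) hre
  rcases hsound _ (reachW_ingrid matrix N c0 w _ hre) hm with h | h
  · exact reachW_ne matrix N c0 w _ hre h
  · exact h.2 rfl

theorem loopL_charW (end_ : List Int) (matrix : List (List Int)) (N : Int)
    (c0 w : Int × Int) :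
    ∀ (f : Nat) (frontier : List (Int × Int)) (v : List (List Bool)),
      InvL end_ matrix N c0 w frontier v →
      (frontier = [] ∨ unvis N v + 1 ≤ f) →
      (pvLoopL end_ matrix N f frontier v = 1 ↔
        ∃ ex ey : Int, end_ = [ex, ey] ∧ ReachW matrix N c0 w (ex, ey)) := by
  intro f
  induction f with
  | zero =>
    intro frontier v hInv hm
    have hq : frontier = [] := by
      rcases hm with h | h
      · exact h
      · omega
    subst hq
    constructor
    · intro h
      exact absurd h (by simp [pvLoopL])
    · intro hex
      exact absurd hex (invL_empty end_ matrix N c0 w v hInv)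
  | succ f ih =>
    intro frontier v hInv hm
    cases frontier with
    | nil =>
      constructor
      · intro h
        exact absurd h (by simp [pvLoopL])
      · intro hex
        exact absurd hex (invL_empty end_ matrix N c0 w v hInv)
    | cons p rest =>
      obtain ⟨hsh, hwg, hwm, hsc, hsound, hcf, hfront⟩ := hInv
      have hstep : pvLoopL end_ matrix N (f + 1) (p :: rest) v =
          (if (pvLevel end_ matrix N (p :: rest) v).1 then 1
           else pvLoopL end_ matrix N f
             (pvLevel end_ matrix N (p :: rest) v).2.1
             (pvLevel end_ matrix N (p :: rest) v).2.2) := by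
        rw [pvLoopL]
      have hLv : pvLevel end_ matrix N (p :: rest) v =
          ((p :: rest).flatMap (fun p' => pvNbrs p'.1 p'.2)).foldl
            (pvVisit end_ matrix N) (false, [], v) := by
        unfold pvLevel
        exact foldl_nested_flatMap (pvVisit end_ matrix N) (fun p' => pvNbrs p'.1 p'.2)
          (p :: rest) (false, [], v)
      obtain ⟨fiff, fok⟩ :=
        foldVisit_char end_ matrix N
          ((p :: rest).flatMap (fun p' => pvNbrs p'.1 p'.2)) [] v hsh
      have hreach_new : ∀ q : Int × Int, GoodC matrix N q →
          (∃ p' ∈ p :: rest, NbrC p' q) → pvVGet v q.1 q.2 = false →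
          ReachW matrix N c0 w q := by
        rintro q hgq ⟨p', hp', hnq⟩ hnew
        have hqw : q ≠ w := by
          intro hqw
          rw [hqw, hwm] at hnew
          exact absurd hnew (by decide)
        rcases hsc p' hp' with rfl | hrc
        · exact ReachW.first hgq hnq hqw
        · exact ReachW.step hrc hgq hnq hqw
      rw [hstep, hLv]
      rcases hflag : (((p :: rest).flatMap (fun p' => pvNbrs p'.1 p'.2)).foldl
          (pvVisit end_ matrix N) (false, [], v)).1 with - | -
      · -- no early hit this generation
        rw [if_neg (by rw [hflag]; decide)]
        obtain ⟨fsh, fm, -, fmem, fpush, fmeas⟩ := fok hflag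
        have hmono : ∀ q : Int × Int, InGrid N q → pvVGet v q.1 q.2 = true →
            pvVGet (((p :: rest).flatMap (fun p' => pvNbrs p'.1 p'.2)).foldl
              (pvVisit end_ matrix N) (false, [], v)).2.2 q.1 q.2 = true := by
          intro q hq h
          exact (fm q hq).mpr (Or.inl h)
        refine ih _ _ ⟨fsh, hwg, hmono w hwg hwm, ?_, ?_, ?_, ?_⟩ ?_
        · -- frontier cells of the next generation
          intro e he
          rcases fmem e he with he' | ⟨hge, hemem, hnew, -⟩
          · exact absurd he' List.not_mem_nil
          · exact Or.inr (hreach_new e hge ((mem_candidates _ e).mp hemem) hnew)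
        · -- soundness of marks
          intro q hq hmk
          rcases (fm q hq).mp hmk with h | ⟨hgq, hqmem⟩
          · exact hsound q hq h
          · rcases Bool.eq_false_or_eq_true (pvVGet v q.1 q.2) with hv | hv
            · exact hsound q hq hv
            · refine Or.inr ⟨hreach_new q hgq ((mem_candidates _ q).mp hqmem) hv, ?_⟩
              intro heq
              have htrue := fiff.mpr ⟨q, hqmem, hgq, hv, heq⟩
              rw [hflag] at htrue
              exact absurd htrue (by decide)
        · -- c0's neighbors are all marked after this generation
          right
          intro q' hgq' hnq'
          rcases hcf with hin | hall
          · exact (fm q' hgq'.1).mpr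
              (Or.inr ⟨hgq', (mem_candidates _ q').mpr ⟨c0, hin, hnq'⟩⟩)
          · exact hmono q' hgq'.1 (hall q' hgq' hnq')
        · -- frontier completeness
          intro q hq hmk
          rcases Bool.eq_false_or_eq_true (pvVGet v q.1 q.2) with hv | hv
          · rcases hfront q hq hv with h | h | h
            · exact Or.inl h
            · right; right
              intro q' hgq' hnq'
              exact (fm q' hgq'.1).mpr
                (Or.inr ⟨hgq', (mem_candidates _ q').mpr ⟨q, h, hnq'⟩⟩)
            · right; right
              intro q' hgq' hnq'
              exact hmono q' hgq'.1 (h q' hgq' hnq')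
          · exact Or.inr (Or.inl (fpush q hq hmk hv))
        · -- fuel
          rcases hm with h | h
          · exact absurd h (by simp)
          · rcases hnx : (((p :: rest).flatMap (fun p' => pvNbrs p'.1 p'.2)).foldl
                (pvVisit end_ matrix N) (false, [], v)).2.1 with - | ⟨e, nxt'⟩
            · exact Or.inl hnx
            · right
              rw [hnx, List.length_cons, List.length_nil] at fmeas
              omega
      · -- the end cell was discovered: both sides are 1
        rw [if_pos hflag]
        simp only [true_iff]
        obtain ⟨q, hqmem, hgq, hun, heq⟩ := fiff.mp hflag
        refine ⟨q.1, q.2, heq, ?_⟩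
        have hq : ((q.1, q.2) : Int × Int) = q := rfl
        rw [hq]
        exact hreach_new q hgq ((mem_candidates _ q).mp hqmem) hun

theorem loopL_zero_or_one (end_ : List Int) (matrix : List (List Int)) (N : Int) :
    ∀ (f : Nat) (frontier : List (Int × Int)) (v : List (List Bool)),
      pvLoopL end_ matrix N f frontier v = 0 ∨ pvLoopL end_ matrix N f frontier v = 1 := by
  intro f
  induction f with
  | zero => intro frontier v; exact Or.inl rfl
  | succ f ih =>
    intro frontier v
    cases frontier with
    | nil => exact Or.inl rfl
    | cons p rest =>
      rw [pvLoopL]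
      split_ifs
      · exact Or.inr rfl
      · exact ih _ _

-- ---------- assembling the two characterizations ----------

theorem toNat_fuel (N : Int) (hN : 1 ≤ N) :
    (2 * N * N + 1).toNat = 2 * (N.toNat * N.toNat) + 1 := by
  have h : N = (N.toNat : Int) := (Int.toNat_of_nonneg (by omega)).symm
  rw [h]
  rw [← Nat.cast_ofNat (n := 2)]
  rw [show ((2 : Nat) : Int) * (N.toNat : Int) * (N.toNat : Int) + 1 =
    (((2 * (N.toNat * N.toNat) + 1 : Nat) : Int)) by push_cast; ring]
  exact Int.toNat_natCast _

theorem init_marks (N s0 s1 : Int) (hN : 1 ≤ N) (h0 : -N ≤ s0) (h02 : s0 < N)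
    (h1 : -N ≤ s1) (h12 : s1 < N) :
    shapeV N (pvVSet (List.replicate N.toNat (List.replicate N.toNat false)) s0 s1) ∧
    pvVGet (pvVSet (List.replicate N.toNat (List.replicate N.toNat false)) s0 s1)
      (wrapI N s0) (wrapI N s1) = true ∧
    (∀ p : Int × Int, InGrid N p →
      pvVGet (pvVSet (List.replicate N.toNat (List.replicate N.toNat false)) s0 s1)
        p.1 p.2 = true → p = (wrapI N s0, wrapI N s1)) := by
  have hsh0 := shapeV_replicate N
  have hw : InGrid N (wrapI N s0, wrapI N s1) := ingrid_wrap N s0 s1 hN h0 h02 h1 h12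
  have hwrap := pvVSet_wrap N _ s0 s1 hsh0 hN h0 h02 h1 h12
  refine ⟨?_, ?_, ?_⟩
  · rw [hwrap]
    exact shapeV_set N _ (wrapI N s0, wrapI N s1) hsh0 hw
  · rw [hwrap]
    have := vget_vset N _ (wrapI N s0, wrapI N s1) (wrapI N s0, wrapI N s1) hsh0 hw hw
    rw [if_pos rfl] at this
    exact this
  · intro p hp hmk
    by_contra hne
    rw [hwrap] at hmk
    rw [vget_vset N _ (wrapI N s0, wrapI N s1) p hsh0 hw hp, if_neg hne,
      vget_replicate N p hp] at hmk
    exact Bool.false_ne_true hmk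

theorem measure_init (N : Int) (hN : 1 ≤ N) (v : List (List Bool)) :
    1 + 2 * unvis N v ≤ (2 * N * N + 1).toNat := by
  have hu := unvis_le N v
  rw [card_gridS N hN] at hu
  rw [toNat_fuel N hN]
  omega

theorem measure_initL (N : Int) (hN : 1 ≤ N) (v : List (List Bool)) :
    unvis N v + 1 ≤ (2 * N * N + 1).toNat := by
  have hu := unvis_le N v
  rw [card_gridS N hN] at hu
  rw [toNat_fuel N hN]
  omega

theorem bfs_eq_acc (start end_ : List Int) (matrix : List (List Int)) (N : Int)
    (hN : 1 ≤ N)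
    (h0 : -N ≤ PySem.List.pyGetD start 0 0) (h02 : PySem.List.pyGetD start 0 0 < N)
    (h1 : -N ≤ PySem.List.pyGetD start 1 0) (h12 : PySem.List.pyGetD start 1 0 < N) :
    (bfs start end_ matrix N = 1 ↔
      AccC start end_ matrix N (PySem.List.pyGetD start 0 0, PySem.List.pyGetD start 1 0)
        (wrapI N (PySem.List.pyGetD start 0 0), wrapI N (PySem.List.pyGetD start 1 0))) := by
  obtain ⟨hsh1, hwm, honly⟩ :=
    init_marks N (PySem.List.pyGetD start 0 0) (PySem.List.pyGetD start 1 0)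
      hN h0 h02 h1 h12
  have hw : InGrid N (wrapI N (PySem.List.pyGetD start 0 0),
      wrapI N (PySem.List.pyGetD start 1 0)) :=
    ingrid_wrap N _ _ hN h0 h02 h1 h12
  unfold bfs
  refine loopA_charW start end_ matrix N _ _ rfl rfl ?_ _ _ _
    ⟨hsh1, hw, hwm, ?_, ?_, ?_, ?_, ?_⟩ ?_
  · intro ha hb
    dsimp only at ha hb ⊢
    unfold wrapI
    rw [if_neg (by omega), if_neg (by omega)]
  · intro e he
    exact Or.inl (List.mem_singleton.mp he)
  · intro p hig hmk
    exact Or.inl (honly p hig hmk)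
  · exact Or.inl (List.mem_singleton.mpr rfl)
  · exact Or.inl (List.mem_singleton.mpr rfl)
  · intro p hig hmk
    exact Or.inl (honly p hig hmk)
  · simp only [List.length_singleton]
    exact measure_init N hN _

theorem bfs_alt_eq_acc (start end_ : List Int) (matrix : List (List Int)) (N : Int)
    (hN : 1 ≤ N)
    (h0 : -N ≤ PySem.List.pyGetD start 0 0) (h02 : PySem.List.pyGetD start 0 0 < N)
    (h1 : -N ≤ PySem.List.pyGetD start 1 0) (h12 : PySem.List.pyGetD start 1 0 < N) :
    (bfs_alt start end_ matrix N = 1 ↔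
      AccC start end_ matrix N (PySem.List.pyGetD start 0 0, PySem.List.pyGetD start 1 0)
        (wrapI N (PySem.List.pyGetD start 0 0), wrapI N (PySem.List.pyGetD start 1 0))) := by
  unfold bfs_alt
  by_cases hse : start = end_
  · rw [if_pos hse]
    simp only [true_iff]
    exact Or.inl hse.symm
  · rw [if_neg hse]
    obtain ⟨hsh1, hwm, honly⟩ :=
      init_marks N (PySem.List.pyGetD start 0 0) (PySem.List.pyGetD start 1 0)
        hN h0 h02 h1 h12
    have hw : InGrid N (wrapI N (PySem.List.pyGetD start 0 0),
        wrapI N (PySem.List.pyGetD start 1 0)) :=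
      ingrid_wrap N _ _ hN h0 h02 h1 h12
    have hsound : ∀ p : Int × Int, InGrid N p →
        pvVGet (pvVSet (List.replicate N.toNat (List.replicate N.toNat false))
          (PySem.List.pyGetD start 0 0) (PySem.List.pyGetD start 1 0)) p.1 p.2 = true →
        p = (wrapI N (PySem.List.pyGetD start 0 0), wrapI N (PySem.List.pyGetD start 1 0)) :=
      honly
    have hiff := loopL_charW end_ matrix N
      (PySem.List.pyGetD start 0 0, PySem.List.pyGetD start 1 0)
      (wrapI N (PySem.List.pyGetD start 0 0), wrapI N (PySem.List.pyGetD start 1 0))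
      ((2 * N * N + 1).toNat)
      [(PySem.List.pyGetD start 0 0, PySem.List.pyGetD start 1 0)] _
      ⟨hsh1, hw, hwm, ?_, ?_, ?_, ?_⟩ (Or.inr (measure_initL N hN _))
    · rw [hiff]
      unfold AccC
      constructor
      · intro h
        exact Or.inr h
      · rintro (h | h)
        · exact absurd h.symm hse
        · exact h
    · intro p hp
      exact Or.inl (List.mem_singleton.mp hp)
    · intro p hig hmk
      exact Or.inl (hsound p hig hmk)
    · exact Or.inl (List.mem_singleton.mpr rfl)
    · intro p hig hmk
      exact Or.inl (hsound p hig hmk)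

theorem bfs_zero_or_one (start end_ : List Int) (matrix : List (List Int)) (N : Int) :
    bfs start end_ matrix N = 0 ∨ bfs start end_ matrix N = 1 := by
  unfold bfs
  exact loopA_zero_or_one end_ matrix N _ _ _

theorem bfs_alt_zero_or_one (start end_ : List Int) (matrix : List (List Int)) (N : Int) :
    bfs_alt start end_ matrix N = 0 ∨ bfs_alt start end_ matrix N = 1 := by
  unfold bfs_alt
  split_ifs
  · exact Or.inr rfl
  · exact loopL_zero_or_one end_ matrix N _ _ _

theorem bfs_spec_core (start end_ : List Int) (matrix : List (List Int)) (N : Int)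
    (hpre : Pre_bfs start end_ matrix N) :
    bfs start end_ matrix N = bfs_alt start end_ matrix N := by
  obtain ⟨hN, -, h0, h02, h1, h12, -⟩ := hpre
  have hA := bfs_eq_acc start end_ matrix N hN h0 h02 h1 h12
  have hB := bfs_alt_eq_acc start end_ matrix N hN h0 h02 h1 h12
  by_cases hacc : AccC start end_ matrix N
      (PySem.List.pyGetD start 0 0, PySem.List.pyGetD start 1 0)
      (wrapI N (PySem.List.pyGetD start 0 0), wrapI N (PySem.List.pyGetD start 1 0))
  · rw [hA.mpr hacc, hB.mpr hacc]
  · rcases bfs_zero_or_one start end_ matrix N with ha | ha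
    · rcases bfs_alt_zero_or_one start end_ matrix N with hb | hb
      · rw [ha, hb]
      · exact absurd (hB.mp hb) hacc
    · exact absurd (hA.mp ha) hacc

-- ===== VERDICT (by name: the statement is the Claim_ definition above) =====
theorem bfs_spec : Claim_equal_bfs := by
  intro start end_ matrix N _ hpre
  unfold Spec_bfs
  exact bfs_spec_core start end_ matrix N hpre
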